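-- pv_equiv track=rewrite | github.com/vladofilipovic/SGI_Python | EserciziAggiuntivi/03-recnici/regioni.py | StatistikaUDrzavi5
-- ===== SOURCE A (Python) =====
-- def StatistikaUDrzavi5(gradovi):
--     pomocna = {}
--     risultato = {}
--     for drzava in gradovi.keys():
--         dizTeritorije = gradovi[drzava]
--         for teritorija in dizTeritorije.keys():
--             dizGradovi = dizTeritorije[teritorija]
--             for grad in dizGradovi.keys():
--                 populacija = dizGradovi[grad]
--                 valore = pomocna.get(drzava, [0, [], []])
--                 valore[0] = valore[0] + populacija
--                 valore[1] = valore[1] + [grad]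
--                 if teritorija not in valore[2]:
--                     valore[2] = valore[2] + [teritorija]
--                 pomocna[drzava] = valore
--     for drzava in pomocna.keys():
--         ukupnaPopulacija = pomocna[drzava][0]
--         listaGradova = pomocna[drzava][1]
--         listaTeritorija = pomocna [drzava][2]
--         risultato[drzava] = (ukupnaPopulacija, len(listaGradova), len(listaTeritorija))
--     return risultato
-- ===== SOURCE B (Python) =====
-- def StatistikaUDrzavi5(gradovi):
--     risultato = {}
--     for drzava, dizTeritorije in gradovi.items():
--         total = 0
--         cityCount = 0
--         terrCount = 0
--         for dizGradovi in dizTeritorije.values():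
--             if dizGradovi:
--                 total += sum(dizGradovi.values())
--                 cityCount += len(dizGradovi)
--                 terrCount += 1
--         if cityCount:
--             risultato[drzava] = (total, cityCount, terrCount)
--     return risultato
-- ===== Notes on version B (the rewrite author's own statement) =====
-- stated objective: simpler
-- what changed: B computes each country's (population sum, city count, territory count) directly with integer counters in one pass over that country's territories, instead of A's whole-traversal helper dict accumulating per-city name lists with a dedup membership test on the territory list plus a separate finalization loop.
import Mathlib
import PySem

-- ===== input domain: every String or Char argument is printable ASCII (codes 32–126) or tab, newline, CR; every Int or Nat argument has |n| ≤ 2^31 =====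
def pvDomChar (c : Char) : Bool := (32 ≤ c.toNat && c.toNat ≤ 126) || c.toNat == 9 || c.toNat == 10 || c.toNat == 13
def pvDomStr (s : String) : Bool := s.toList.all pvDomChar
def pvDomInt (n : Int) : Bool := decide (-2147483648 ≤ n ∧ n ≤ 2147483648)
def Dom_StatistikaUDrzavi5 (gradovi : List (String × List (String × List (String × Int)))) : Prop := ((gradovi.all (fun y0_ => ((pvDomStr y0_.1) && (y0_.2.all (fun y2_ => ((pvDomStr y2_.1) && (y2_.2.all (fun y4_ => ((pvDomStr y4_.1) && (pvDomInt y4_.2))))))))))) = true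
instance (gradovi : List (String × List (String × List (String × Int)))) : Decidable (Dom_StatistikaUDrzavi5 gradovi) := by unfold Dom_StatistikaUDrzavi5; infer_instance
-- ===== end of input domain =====

-- B replaces A's whole-traversal helper dict (city/territory lists, dedup membership test,
-- separate finalization loop) by per-country integer counters computed in one direct pass: simpler.


-- ===== PORT A =====
-- A iterates 'for k in d.keys(): v = d[k]' over real Python dicts; under Pre_ (unique keys at
-- every level) the association list IS the dict's items, so this is transliterated as a fold
-- over the (key, value) pairs, which is exactly that iteration for a dict.
def StatistikaUDrzavi5 (gradovi : List (String × List (String × List (String × Int)))) : List (String × Int × Int × Int) :=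
  let pomocna : PySem.Dict String (Int × List String × List String) :=
    gradovi.foldl (fun pom p =>
      p.2.foldl (fun pom q =>
        q.2.foldl (fun pom r =>
          let valore := pom.getD p.1 (0, [], [])
          let v0 := valore.1 + r.2
          let v1 := valore.2.1 ++ [r.1]
          let v2 := if q.1 ∈ valore.2.2 then valore.2.2 else valore.2.2 ++ [q.1]
          pom.insert p.1 (v0, v1, v2)) pom) pom) PySem.Dict.empty
  let risultato : PySem.Dict String (Int × Int × Int) :=
    pomocna.items.foldl (fun ris pr =>
      ris.insert pr.1 (pr.2.1, PySem.List.len pr.2.2.1, PySem.List.len pr.2.2.2)) PySem.Dict.empty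
  risultato.items

-- ===== PORT B =====
def StatistikaUDrzavi5_alt (gradovi : List (String × List (String × List (String × Int)))) : List (String × Int × Int × Int) :=
  gradovi.foldl (fun ris p =>
    let s := p.2.foldl (fun (t : Int × Int × Int) q =>
      if q.2 ≠ [] then (t.1 + (q.2.map Prod.snd).sum, t.2.1 + PySem.List.len q.2, t.2.2 + 1)
      else t) (0, 0, 0)
    if s.2.1 ≠ 0 then ris ++ [(p.1, s)] else ris) []

-- ===== PRECONDITION & SPEC =====
-- Pre_ requires unique keys at every nesting level: the inputs are Python dicts, whose
-- association-list encoding has distinct keys by construction, so nothing a Python call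
-- can reach is excluded.
def Pre_StatistikaUDrzavi5 (gradovi : List (String × List (String × List (String × Int)))) : Prop :=
  (gradovi.map Prod.fst).Nodup ∧
  ∀ p ∈ gradovi, (p.2.map Prod.fst).Nodup ∧ ∀ q ∈ p.2, (q.2.map Prod.fst).Nodup
instance (gradovi : List (String × List (String × List (String × Int)))) : Decidable (Pre_StatistikaUDrzavi5 gradovi) := by unfold Pre_StatistikaUDrzavi5; infer_instance

def pvWitness_StatistikaUDrzavi5 : (List (String × List (String × List (String × Int)))) :=
  [("rs", [("v", [("ns", 3), ("su", 2)]), ("ks", [])]), ("hr", [])]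

def Spec_StatistikaUDrzavi5 (gradovi : List (String × List (String × List (String × Int)))) (out : List (String × Int × Int × Int)) : Prop := out = StatistikaUDrzavi5_alt gradovi
instance (gradovi : List (String × List (String × List (String × Int)))) (out : List (String × Int × Int × Int)) : Decidable (Spec_StatistikaUDrzavi5 gradovi out) := by unfold Spec_StatistikaUDrzavi5; infer_instance

-- ===== CLAIM (what is proved, stated in full; the proofs are below) =====
def Claim_equal_StatistikaUDrzavi5 : Prop := ∀ (gradovi : List (String × List (String × List (String × Int)))), Dom_StatistikaUDrzavi5 gradovi → Pre_StatistikaUDrzavi5 gradovi → Spec_StatistikaUDrzavi5 gradovi (StatistikaUDrzavi5 gradovi)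

-- ===== LEMMAS AND PROOFS =====

-- Helper names for the proofs: the per-city update, per-territory and per-country folds of A,
-- and B's per-country counter fold (each definitionally equal to the corresponding lambda in the ports).
def pvD0 : Int × List String × List String := (0, [], [])

def pvCity (t : String) (r : String × Int) (v : Int × List String × List String) :
    Int × List String × List String :=
  (v.1 + r.2, v.2.1 ++ [r.1], if t ∈ v.2.2 then v.2.2 else v.2.2 ++ [t])

def pvInner (t : String) (cs : List (String × Int)) (v : Int × List String × List String) :
    Int × List String × List String :=
  cs.foldl (fun v r => pvCity t r v) v

def pvMid (ts : List (String × List (String × Int))) (v : Int × List String × List String) :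
    Int × List String × List String :=
  ts.foldl (fun v q => pvInner q.1 q.2 v) v

def pvAllE (ts : List (String × List (String × Int))) : Bool := ts.all (fun q => q.2.isEmpty)

def pvB (ts : List (String × List (String × Int))) : Int × Int × Int :=
  ts.foldl (fun (t : Int × Int × Int) q =>
    if q.2 ≠ [] then (t.1 + (q.2.map Prod.snd).sum, t.2.1 + PySem.List.len q.2, t.2.2 + 1)
    else t) (0, 0, 0)

theorem pvInner_of_mem (t : String) (cs : List (String × Int)) (v : Int × List String × List String)
    (h : t ∈ v.2.2) :
    pvInner t cs v = (v.1 + (cs.map Prod.snd).sum, v.2.1 ++ cs.map Prod.fst, v.2.2) := by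
  induction cs generalizing v with
  | nil => simp [pvInner]
  | cons r cs ih =>
      have : pvInner t (r :: cs) v = pvInner t cs (pvCity t r v) := rfl
      rw [this, pvCity, if_pos h, ih (v.1 + r.2, v.2.1 ++ [r.1], v.2.2) h]
      simp [add_assoc, List.append_assoc]

theorem pvInner_of_not_mem (t : String) (cs : List (String × Int)) (v : Int × List String × List String)
    (h : t ∉ v.2.2) :
    pvInner t cs v = (v.1 + (cs.map Prod.snd).sum, v.2.1 ++ cs.map Prod.fst,
      if cs.isEmpty then v.2.2 else v.2.2 ++ [t]) := by
  cases cs with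
  | nil => simp [pvInner]
  | cons r cs =>
      have h1 : pvInner t (r :: cs) v = pvInner t cs (pvCity t r v) := rfl
      rw [h1, pvCity, if_neg h, pvInner_of_mem t cs _ (by simp)]
      simp [add_assoc, List.append_assoc]

theorem pvMid_char (ts : List (String × List (String × Int))) (v : Int × List String × List String)
    (hnd : (ts.map Prod.fst).Nodup) (hdis : ∀ q ∈ ts, q.1 ∉ v.2.2) :
    pvMid ts v = (v.1 + (ts.map (fun q => (q.2.map Prod.snd).sum)).sum,
      v.2.1 ++ ts.flatMap (fun q => q.2.map Prod.fst),
      v.2.2 ++ (ts.filter (fun q => !q.2.isEmpty)).map Prod.fst) := by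
  induction ts generalizing v with
  | nil => simp [pvMid]
  | cons q ts ih =>
      have h1 : pvMid (q :: ts) v = pvMid ts (pvInner q.1 q.2 v) := rfl
      rw [h1, pvInner_of_not_mem q.1 q.2 v (hdis q (by simp))]
      have hnd' : (ts.map Prod.fst).Nodup := (List.nodup_cons.mp hnd).2
      have hq : q.1 ∉ ts.map Prod.fst := (List.nodup_cons.mp hnd).1
      cases hE : q.2.isEmpty with
      | true =>
          have hq2 : q.2 = [] := List.isEmpty_iff.mp hE
          rw [ih _ hnd' (by
            intro q' hq'
            simpa [hE] using hdis q' (by simp [hq']))]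
          simp [hq2]
      | false =>
          rw [ih _ hnd' (by
            intro q' hq'
            have hne : q'.1 ≠ q.1 := by
              intro hcontra
              exact hq (hcontra ▸ List.mem_map_of_mem hq')
            simp only [if_neg (by simp : ¬ false = true)]
            simp only [List.mem_append, List.mem_singleton]
            push Not
            exact ⟨hdis q' (by simp [hq']), hne⟩)]
          simp [hE, add_assoc, List.append_assoc]

theorem pvMid_allE (ts : List (String × List (String × Int))) (v : Int × List String × List String)
    (h : pvAllE ts = true) : pvMid ts v = v := by
  induction ts generalizing v with
  | nil => rfl
  | cons q ts ih =>
      simp only [pvAllE, List.all_cons, Bool.and_eq_true, List.isEmpty_iff] at h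
      have h1 : pvMid (q :: ts) v = pvMid ts (pvInner q.1 q.2 v) := rfl
      rw [h1, h.1]
      exact ih v (by simp [pvAllE, h.2])

theorem pvCityFold (k t : String) (cs : List (String × Int))
    (pom : PySem.Dict String (Int × List String × List String)) (h : cs ≠ []) :
    cs.foldl (fun pom r => pom.insert k (pvCity t r (pom.getD k pvD0))) pom
      = pom.insert k (pvInner t cs (pom.getD k pvD0)) := by
  induction cs generalizing pom with
  | nil => exact absurd rfl h
  | cons r cs ih =>
      by_cases hcs : cs = []
      · subst hcs; rfl
      · have h1 : (r :: cs).foldl (fun pom r => pom.insert k (pvCity t r (pom.getD k pvD0))) pom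
            = cs.foldl (fun pom r => pom.insert k (pvCity t r (pom.getD k pvD0)))
                (pom.insert k (pvCity t r (pom.getD k pvD0))) := rfl
        rw [h1, ih _ hcs, PySem.Dict.getD_insert_self, PySem.Dict.insert_insert_self]
        rfl

theorem pvCountry (k : String) (ts : List (String × List (String × Int)))
    (pom : PySem.Dict String (Int × List String × List String)) :
    ts.foldl (fun pom q => q.2.foldl (fun pom r => pom.insert k (pvCity q.1 r (pom.getD k pvD0))) pom) pom
      = if pvAllE ts then pom else pom.insert k (pvMid ts (pom.getD k pvD0)) := by
  induction ts generalizing pom with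
  | nil => simp [pvAllE]
  | cons q ts ih =>
      by_cases hq : q.2 = []
      · have h1 : (q :: ts).foldl (fun pom q => q.2.foldl (fun pom r => pom.insert k (pvCity q.1 r (pom.getD k pvD0))) pom) pom
            = ts.foldl (fun pom q => q.2.foldl (fun pom r => pom.insert k (pvCity q.1 r (pom.getD k pvD0))) pom) pom := by
          simp [hq]
        have h2 : pvAllE (q :: ts) = pvAllE ts := by simp [pvAllE, hq]
        have h3 : ∀ v, pvMid (q :: ts) v = pvMid ts v := by
          intro v
          show pvMid ts (pvInner q.1 q.2 v) = pvMid ts v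
          rw [hq]; rfl
        rw [h1, ih, h2, h3]
      · have h1 : (q :: ts).foldl (fun pom q => q.2.foldl (fun pom r => pom.insert k (pvCity q.1 r (pom.getD k pvD0))) pom) pom
            = ts.foldl (fun pom q => q.2.foldl (fun pom r => pom.insert k (pvCity q.1 r (pom.getD k pvD0))) pom)
                (q.2.foldl (fun pom r => pom.insert k (pvCity q.1 r (pom.getD k pvD0))) pom) := rfl
        rw [h1, pvCityFold k q.1 q.2 pom hq, ih]
        have h2 : pvAllE (q :: ts) = false := by simp [pvAllE, hq]
        rw [h2]
        have hmid : ∀ v, pvMid (q :: ts) v = pvMid ts (pvInner q.1 q.2 v) := fun _ => rfl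
        by_cases hA : pvAllE ts = true
        · rw [if_pos hA, if_neg (by simp), hmid, pvMid_allE ts _ hA]
        · rw [if_neg hA, if_neg (by simp), PySem.Dict.getD_insert_self,
            PySem.Dict.insert_insert_self, hmid]

theorem pvOuter (cs : List (String × List (String × List (String × Int))))
    (pom : PySem.Dict String (Int × List String × List String))
    (hnd : (cs.map Prod.fst).Nodup) (hc : ∀ p ∈ cs, pom.contains p.1 = false) :
    (cs.foldl (fun pom p => p.2.foldl (fun pom q => q.2.foldl (fun pom r => pom.insert p.1 (pvCity q.1 r (pom.getD p.1 pvD0))) pom) pom) pom).items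
      = pom.items ++ (cs.filter (fun p => !pvAllE p.2)).map (fun p => (p.1, pvMid p.2 pvD0)) := by
  induction cs generalizing pom with
  | nil => simp
  | cons p cs ih =>
      have hnd' : (cs.map Prod.fst).Nodup := (List.nodup_cons.mp hnd).2
      have hp : p.1 ∉ cs.map Prod.fst := (List.nodup_cons.mp hnd).1
      have h1 : (p :: cs).foldl (fun pom p => p.2.foldl (fun pom q => q.2.foldl (fun pom r => pom.insert p.1 (pvCity q.1 r (pom.getD p.1 pvD0))) pom) pom) pom
          = cs.foldl (fun pom p => p.2.foldl (fun pom q => q.2.foldl (fun pom r => pom.insert p.1 (pvCity q.1 r (pom.getD p.1 pvD0))) pom) pom)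
              (p.2.foldl (fun pom q => q.2.foldl (fun pom r => pom.insert p.1 (pvCity q.1 r (pom.getD p.1 pvD0))) pom) pom) := rfl
      rw [h1, pvCountry p.1 p.2 pom]
      cases hA : pvAllE p.2 with
      | true =>
          rw [if_pos rfl, ih pom hnd' (fun p' hp' => hc p' (by simp [hp']))]
          simp [hA]
      | false =>
          rw [if_neg (by simp)]
          rw [PySem.Dict.getD_of_not_contains pom pvD0 (hc p (by simp))]
          have hcontains : ∀ p' ∈ cs, (pom.insert p.1 (pvMid p.2 pvD0)).contains p'.1 = false := by
            intro p' hp'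
            rw [PySem.Dict.contains_insert]
            have hne : p'.1 ≠ p.1 := by
              intro hcontra
              exact hp (hcontra ▸ List.mem_map_of_mem hp')
            simp [hne, hc p' (by simp [hp'])]
          rw [ih _ hnd' hcontains,
            PySem.Dict.items_insert_of_not_contains pom _ (hc p (by simp))]
          simp [hA, List.append_assoc]

theorem pvFinal (l : List (String × (Int × List String × List String)))
    (h1 : (l.map Prod.fst).Nodup) :
    (l.foldl (fun ris pr => ris.insert pr.1 (pr.2.1, PySem.List.len pr.2.2.1, PySem.List.len pr.2.2.2)) PySem.Dict.empty).items
      = l.map (fun pr => (pr.1, pr.2.1, PySem.List.len pr.2.2.1, PySem.List.len pr.2.2.2)) := by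
  have h := PySem.Dict.items_foldl_insert_fresh l Prod.fst
    (fun pr => (pr.2.1, PySem.List.len pr.2.2.1, PySem.List.len pr.2.2.2)) PySem.Dict.empty
    (fun a _ => PySem.Dict.contains_empty _) h1
  simpa using h

theorem pvB_acc (ts : List (String × List (String × Int))) (t : Int × Int × Int) :
    ts.foldl (fun (t : Int × Int × Int) q =>
        if q.2 ≠ [] then (t.1 + (q.2.map Prod.snd).sum, t.2.1 + PySem.List.len q.2, t.2.2 + 1)
        else t) t
      = (t.1 + (ts.map (fun q => (q.2.map Prod.snd).sum)).sum,
         t.2.1 + (ts.map (fun q => PySem.List.len q.2)).sum,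
         t.2.2 + ((ts.filter (fun q => !q.2.isEmpty)).length : Int)) := by
  induction ts generalizing t with
  | nil => simp
  | cons q ts ih =>
      by_cases hq : q.2 = []
      · rw [List.foldl_cons, if_neg (by simp [hq]), ih]
        simp [hq]
      · rw [List.foldl_cons, if_pos hq, ih]
        rw [List.filter_cons, if_pos (by simp [hq])]
        simp [add_assoc]
        omega

theorem pvB_char (ts : List (String × List (String × Int))) :
    pvB ts = ((ts.map (fun q => (q.2.map Prod.snd).sum)).sum,
      (ts.map (fun q => PySem.List.len q.2)).sum,
      ((ts.filter (fun q => !q.2.isEmpty)).length : Int)) := by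
  have h := pvB_acc ts (0, 0, 0)
  simpa [pvB] using h

theorem pvSumLen_eq (ts : List (String × List (String × Int))) :
    ((ts.flatMap (fun q => q.2.map Prod.fst)).length : Int)
      = (ts.map (fun q => PySem.List.len q.2)).sum := by
  induction ts with
  | nil => simp
  | cons q ts ih => simp [List.flatMap_cons, PySem.List.len_eq, Function.comp_def]

theorem pvAllE_iff (ts : List (String × List (String × Int))) :
    (ts.map (fun q => PySem.List.len q.2)).sum = 0 ↔ pvAllE ts = true := by
  rw [← pvSumLen_eq]
  constructor
  · intro h
    have h2 : (ts.flatMap (fun q => q.2.map Prod.fst)).length = 0 := by exact_mod_cast h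
    have h3 := List.flatMap_eq_nil_iff.mp (List.length_eq_zero_iff.mp h2)
    simp only [pvAllE, List.all_eq_true, List.isEmpty_iff]
    intro q hq
    exact List.map_eq_nil_iff.mp (h3 q hq)
  · intro h
    have h2 : ts.flatMap (fun q => q.2.map Prod.fst) = [] := by
      apply List.flatMap_eq_nil_iff.mpr
      intro q hq
      simp only [pvAllE, List.all_eq_true, List.isEmpty_iff] at h
      simp [h q hq]
    simp [h2]

theorem pvBalt_filter (g : List (String × List (String × List (String × Int))))
    (acc : List (String × Int × Int × Int)) :
    g.foldl (fun ris p => if (pvB p.2).2.1 ≠ 0 then ris ++ [(p.1, pvB p.2)] else ris) acc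
      = acc ++ (g.filter (fun p => !pvAllE p.2)).map (fun p => (p.1, pvB p.2)) := by
  induction g generalizing acc with
  | nil => simp
  | cons p g ih =>
      have hiff := pvAllE_iff p.2
      have hcond : ((pvB p.2).2.1 ≠ 0) ↔ (!pvAllE p.2) = true := by
        rw [pvB_char]
        constructor
        · intro hne
          cases hb : pvAllE p.2
          · rfl
          · exact absurd (hiff.mpr hb) hne
        · intro hb h0
          rw [hiff] at h0
          rw [h0] at hb
          simp at hb
      by_cases hp : (pvB p.2).2.1 ≠ 0
      · rw [List.foldl_cons, if_pos hp, ih]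
        rw [List.filter_cons, if_pos (hcond.mp hp)]
        simp [List.append_assoc]
      · rw [List.foldl_cons, if_neg hp, ih]
        rw [List.filter_cons, if_neg (fun hb => hp (hcond.mpr hb))]

-- ===== VERDICT (by name: the statement is the Claim_ definition above) =====
theorem StatistikaUDrzavi5_spec : Claim_equal_StatistikaUDrzavi5 := by
  intro g _hdom hpre
  obtain ⟨hnd, hin⟩ := hpre
  unfold Spec_StatistikaUDrzavi5
  have hA : StatistikaUDrzavi5 g
      = ((g.foldl (fun pom p => p.2.foldl (fun pom q => q.2.foldl (fun pom r =>
            pom.insert p.1 (pvCity q.1 r (pom.getD p.1 pvD0))) pom) pom)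
            (PySem.Dict.empty : PySem.Dict String (Int × List String × List String))).items.foldl
          (fun ris pr => ris.insert pr.1 (pr.2.1, PySem.List.len pr.2.2.1, PySem.List.len pr.2.2.2))
          (PySem.Dict.empty : PySem.Dict String (Int × Int × Int))).items := rfl
  have hB : StatistikaUDrzavi5_alt g
      = g.foldl (fun ris p => if (pvB p.2).2.1 ≠ 0 then ris ++ [(p.1, pvB p.2)] else ris) [] := rfl
  have hempty : (PySem.Dict.empty : PySem.Dict String (Int × List String × List String)).items = [] := rfl
  rw [hA, hB, pvOuter g PySem.Dict.empty hnd (fun p _ => PySem.Dict.contains_empty _),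
    pvBalt_filter g [], hempty, List.nil_append, List.nil_append]
  have hsub : ((g.filter (fun p => !pvAllE p.2)).map Prod.fst).Sublist (g.map Prod.fst) :=
    List.Sublist.map Prod.fst List.filter_sublist
  rw [pvFinal _ (by simpa [List.map_map, Function.comp_def] using hnd.sublist hsub)]
  rw [List.map_map]
  apply List.map_congr_left
  intro p hp
  have hpg := List.mem_of_mem_filter hp
  obtain ⟨hndp, _⟩ := hin p hpg
  simp only [Function.comp_def]
  rw [pvMid_char p.2 pvD0 hndp (by intro q hq; simp [pvD0])]
  simp [pvB_char, pvD0, PySem.List.len_eq, Function.comp_def]
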